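-- pv_equiv track=rewrite | github.com/bahailu-abera/cryptography | rsa_enc.py | unblock
-- ===== SOURCE A (Python) =====
-- def maper(text,change=False):
--  value=str()
--  trans=dict()
--  trans={'a':'10','b':'11','c':'12','d':'13','e':'14','f':'15','g':'16','h':'17','i':'18','j':'19','k':'20','l':'21','m':'22','n':'23','o':'24','p':'25','q':'26','r':'27','s':'28','t':'29','u':'30','v':'31','w':'32','x':'33','y':'34','z':'35',' ':'36'}
--  if not change:
--   for letter in text:
--    value+=trans[letter]
--   return value
--  else:
--   temp=dict()
--   for k,v in trans.items():
--    temp[v]=k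
--   for num in text:
--    if num in temp:
--     lett=temp[num]
--     value+=lett
--   return value
--
-- def unblock(blockes):
--  string=str()
--  for block in blockes:
--   string+=str(block)
--  i=0
--  temp=[ ]
--  while i<len(string):
--   temp.append(string[i:i+2])
--   i+=2
--  v=maper(temp,True)
--
--  return v
-- ===== SOURCE B (Python) =====
-- def unblock(blockes):
--     # Streaming decoder: no joined digit string, no chunk list, no dict.
--     # One pass over the characters of each block's decimal rendering, carrying
--     # at most one pending character; each completed pair is decoded arithmetically.
--     out = []
--     pending = None
--     for block in blockes:
--         for c in str(block):
--             if pending is None: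
--                 pending = c
--             else:
--                 if pending.isdigit() and c.isdigit():
--                     n = 10 * int(pending) + int(c)
--                     if 10 <= n <= 35:
--                         out.append(chr(87 + n))
--                     elif n == 36:
--                         out.append(' ')
--                 pending = None
--     return ''.join(out)
-- ===== Notes on version B (the rewrite author's own statement) =====
-- stated objective: alternative
-- what changed: B is a streaming single pass: it never materialises the joined digit string, the chunk list or any dict; it iterates the characters of each block's str() directly, carrying one pending character across block boundaries, and decodes each completed pair arithmetically (chr(87+n), 36 -> space, anything else skipped), dropping a trailing unpaired character.
import Mathlib
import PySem

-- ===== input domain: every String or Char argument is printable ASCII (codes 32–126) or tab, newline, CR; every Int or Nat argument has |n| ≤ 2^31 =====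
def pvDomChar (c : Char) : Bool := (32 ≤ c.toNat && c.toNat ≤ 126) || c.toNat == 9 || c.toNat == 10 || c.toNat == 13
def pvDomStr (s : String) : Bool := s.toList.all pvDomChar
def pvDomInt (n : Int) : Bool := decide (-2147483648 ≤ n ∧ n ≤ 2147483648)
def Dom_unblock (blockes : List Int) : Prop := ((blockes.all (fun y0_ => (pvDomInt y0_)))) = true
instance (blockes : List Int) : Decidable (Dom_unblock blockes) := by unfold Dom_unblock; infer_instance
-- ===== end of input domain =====

-- B replaces A's staged pipeline (join all blocks into one digit string, slice it into a chunk
-- list, decode through a reversed dict) by a single streaming pass with a one-character carry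
-- and arithmetic pair decoding; same return value.

-- ===== PORT A =====
-- Python strings are ported as List Char throughout; the final result is packed with String.ofList.

-- maper's 'trans' dict (letter -> two-digit code), built once as in the Python source
def transA : PySem.Dict (List Char) (List Char) := PySem.Dict.ofList
  [(['a'],['1','0']),(['b'],['1','1']),(['c'],['1','2']),(['d'],['1','3']),(['e'],['1','4']),
   (['f'],['1','5']),(['g'],['1','6']),(['h'],['1','7']),(['i'],['1','8']),(['j'],['1','9']),
   (['k'],['2','0']),(['l'],['2','1']),(['m'],['2','2']),(['n'],['2','3']),(['o'],['2','4']),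
   (['p'],['2','5']),(['q'],['2','6']),(['r'],['2','7']),(['s'],['2','8']),(['t'],['2','9']),
   (['u'],['3','0']),(['v'],['3','1']),(['w'],['3','2']),(['x'],['3','3']),(['y'],['3','4']),
   (['z'],['3','5']),([' '],['3','6'])]

-- 'temp': the reversed dict, built by the loop 'for k,v in trans.items(): temp[v]=k'
def tempA : PySem.Dict (List Char) (List Char) :=
  transA.items.foldl (fun d kv => d.insert kv.2 kv.1) PySem.Dict.empty

-- maper(text, change): the change=False branch ('value += trans[letter]', KeyError on a missing
-- letter, never reached from unblock) is ported with getD [] — unreachable from unblock (change=True).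
def maperA (text : List (List Char)) (change : Bool) : List Char :=
  if !change then
    text.foldl (fun value letter => value ++ transA.getD letter []) []
  else
    text.foldl (fun value num =>
      if tempA.contains num then value ++ tempA.getD num [] else value) []

-- the while loop 'temp.append(string[i:i+2]); i += 2' as the obvious recursion on the remaining chars
def chunkA : List Char → List (List Char)
  | [] => []
  | [a] => [[a]]
  | a :: b :: rest => [a, b] :: chunkA rest

def unblock (blockes : List Int) : String :=
  let string := blockes.foldl (fun s block => s ++ PySem.Int.toChars block) []
  let temp := chunkA string
  String.ofList (maperA temp true)

-- ===== PORT B =====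
-- decode of one completed pair: 'if pending.isdigit() and c.isdigit(): n = 10*int(pending)+int(c); ...'
def pairDec (p c : Char) : List Char :=
  if PySem.Chars.isdigit p && PySem.Chars.isdigit c then
    let n := 10 * (p.toNat - 48) + (c.toNat - 48)     -- 10*int(pending) + int(c)
    if 10 ≤ n ∧ n ≤ 35 then [Char.ofNat (87 + n)]     -- chr(87 + n)
    else if n = 36 then [' ']
    else []
  else []

-- one step of the inner loop body, over the state (out, pending)
def stepB (st : List Char × Option Char) (c : Char) : List Char × Option Char :=
  match st.2 with
  | none => (st.1, some c)
  | some p => (st.1 ++ pairDec p c, none)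

def unblock_alt (blockes : List Int) : String :=
  String.ofList
    (blockes.foldl (fun st block => (PySem.Int.toChars block).foldl stepB st) ([], none)).1

-- ===== PRECONDITION & SPEC =====
def Spec_unblock (blockes : List Int) (out : String) : Prop := out = unblock_alt blockes
instance (blockes : List Int) (out : String) : Decidable (Spec_unblock blockes out) := by unfold Spec_unblock; infer_instance

-- ===== CLAIM =====
def Claim_equal_unblock : Prop := ∀ (blockes : List Int), Dom_unblock blockes → Spec_unblock blockes (unblock blockes)

-- ===== LEMMAS AND PROOFS =====

-- the reversed dict, as a literal
theorem tempA_eq : tempA = PySem.Dict.mk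
    [(['1','0'],['a']),(['1','1'],['b']),(['1','2'],['c']),(['1','3'],['d']),(['1','4'],['e']),
     (['1','5'],['f']),(['1','6'],['g']),(['1','7'],['h']),(['1','8'],['i']),(['1','9'],['j']),
     (['2','0'],['k']),(['2','1'],['l']),(['2','2'],['m']),(['2','3'],['n']),(['2','4'],['o']),
     (['2','5'],['p']),(['2','6'],['q']),(['2','7'],['r']),(['2','8'],['s']),(['2','9'],['t']),
     (['3','0'],['u']),(['3','1'],['v']),(['3','2'],['w']),(['3','3'],['x']),(['3','4'],['y']),
     (['3','5'],['z']),(['3','6'],[' '])] := by decide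

theorem tempA_keys_digit : ∀ key ∈ tempA.keys, key.length = 2 ∧ key.all PySem.Chars.isdigit := by
  rw [tempA_eq]; decide

-- per-chunk decoder seen on A's side
def dictDec (c : List Char) : List Char :=
  if tempA.contains c then tempA.getD c [] else []

-- per-chunk decoder seen on B's side (a pair decodes; a trailing singleton is dropped)
def pairsDec : List Char → List Char
  | [a, b] => pairDec a b
  | _ => []

theorem dictDec_none (c : List Char) (h : ¬ (c.length = 2 ∧ c.all PySem.Chars.isdigit)) :
    dictDec c = [] := by
  unfold dictDec
  have hnone : tempA.get? c = none := by
    by_contra hc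
    have hmem : c ∈ tempA.keys := by
      by_contra hm
      exact hc ((PySem.Dict.get?_eq_none_iff_not_mem_keys _ _).mpr hm)
    exact h (tempA_keys_digit c hmem)
  rw [PySem.Dict.contains_eq_isSome_get?, hnone]
  simp

-- A's reversed-dict lookup of a chunk is B's pair decode
theorem chunk_eq (c : List Char) : dictDec c = pairsDec c := by
  match c with
  | [] => exact dictDec_none [] (by simp)
  | [a] => exact dictDec_none [a] (by simp)
  | a :: b :: d :: rest =>
    have : ¬ ((a :: b :: d :: rest).length = 2 ∧ (a :: b :: d :: rest).all PySem.Chars.isdigit) := by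
      simp
    rw [dictDec_none _ this]; rfl
  | [a, b] =>
    by_cases hd : PySem.Chars.isdigit a = true ∧ PySem.Chars.isdigit b = true
    · obtain ⟨ha, hb⟩ := hd
      obtain ⟨m, hm, hm1, hm2⟩ : ∃ m, a = Char.ofNat m ∧ 48 ≤ m ∧ m ≤ 57 := by
        refine ⟨a.toNat, (Char.ofNat_toNat a).symm, ?_, ?_⟩ <;>
          (simp [PySem.Chars.isdigit, Char.le_def, UInt32.le_iff_toNat_le] at ha; omega)
      obtain ⟨k, hk, hk1, hk2⟩ : ∃ k, b = Char.ofNat k ∧ 48 ≤ k ∧ k ≤ 57 := by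
        refine ⟨b.toNat, (Char.ofNat_toNat b).symm, ?_, ?_⟩ <;>
          (simp [PySem.Chars.isdigit, Char.le_def, UInt32.le_iff_toNat_le] at hb; omega)
      subst hm hk; clear ha hb
      unfold dictDec
      rw [tempA_eq]
      interval_cases m <;> interval_cases k <;> decide
    · have hne : ¬ ([a, b].length = 2 ∧ [a, b].all PySem.Chars.isdigit) := by
        simp only [List.all_cons, List.all_nil, Bool.and_true, Bool.and_eq_true]
        tauto
      rw [dictDec_none _ hne]
      show [] = pairDec a b
      unfold pairDec
      rw [if_neg]
      simp only [Bool.and_eq_true]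
      tauto

-- maper(·, True) is the concatenation of the per-chunk lookups
theorem maperA_true (text : List (List Char)) :
    maperA text true = text.flatMap dictDec := by
  unfold maperA
  have hfun : (fun (value : List Char) num =>
      if tempA.contains num then value ++ tempA.getD num [] else value)
      = fun value num => value ++ dictDec num := by
    funext v num; unfold dictDec; split <;> simp
  simp only [Bool.not_true, Bool.false_eq_true, if_false, hfun,
    PySem.List.foldl_append_eq_flatMap, List.nil_append]

-- the streaming pass, run from an empty carry, emits exactly the per-chunk decodes of A's chunk list
theorem run_stepB : ∀ (s acc : List Char),
    (s.foldl stepB (acc, none)).1 = acc ++ (chunkA s).flatMap pairsDec := by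
  intro s
  induction s using chunkA.induct with
  | case1 => intro acc; simp [chunkA]
  | case2 a => intro acc; simp [chunkA, stepB, pairsDec]
  | case3 a b rest ih =>
    intro acc
    show ((rest.foldl stepB (stepB (stepB (acc, none) a) b))).1
        = acc ++ (chunkA (a :: b :: rest)).flatMap pairsDec
    have h2 : stepB (stepB (acc, none) a) b = (acc ++ pairDec a b, none) := rfl
    rw [h2, ih]
    simp [chunkA, pairsDec]

-- both programs traverse the same character stream: A's foldl-append concat is the flatten
theorem concat_eq (blockes : List Int) :
    blockes.foldl (fun s block => s ++ PySem.Int.toChars block) []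
      = (blockes.map PySem.Int.toChars).flatten := by
  rw [PySem.List.foldl_append_eq_flatMap, List.nil_append, List.flatMap_def]

-- B's nested fold over blocks is the fold of stepB over the flattened character stream
theorem nested_fold (blockes : List Int) (st : List Char × Option Char) :
    blockes.foldl (fun st block => (PySem.Int.toChars block).foldl stepB st) st
      = ((blockes.map PySem.Int.toChars).flatten).foldl stepB st := by
  induction blockes generalizing st with
  | nil => rfl
  | cons x xs ih => simp [List.foldl_append, ih]

-- ===== VERDICT =====
theorem unblock_spec : Claim_equal_unblock := by
  intro blockes _
  unfold Spec_unblock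
  simp only [unblock, unblock_alt]
  rw [concat_eq, nested_fold, run_stepB, List.nil_append, maperA_true]
  congr 1
  induction chunkA ((blockes.map PySem.Int.toChars).flatten) with
  | nil => rfl
  | cons c cs ih => simp [List.flatMap_cons, chunk_eq c, ih]
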